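-- pv_equiv track=rewrite | github.com/xdze2/CuNb | diff_X/two_theta_values.py | all_hkl
-- ===== SOURCE A (Python) =====
-- def all_hkl(n_max=7):
--     """Generate all possible hlk triplet"""
--     all_hkl = []
--     for l in range(1, n_max):  #  <-- indice max.
--         for k in range(l+1):
--             for h in range(k+1):
--                 all_hkl.append(sorted([h, k, l], reverse=True))
--
--     all_hkl = sorted(all_hkl, key=lambda x: sum(i**2 for i in x))
--     return all_hkl
-- ===== SOURCE B (Python) =====
-- def all_hkl(n_max=7):
--     """Generate all possible hlk triplet"""
--     if n_max <= 1:
--         return []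
--     size = 3 * (n_max - 1) ** 2 + 1
--     buckets = [[] for _ in range(size)]
--     for l in range(1, n_max):
--         for k in range(l + 1):
--             for h in range(k + 1):
--                 buckets[l ** 2 + k ** 2 + h ** 2].append([l, k, h])
--     out = []
--     for b in buckets:
--         out.extend(b)
--     return out
-- ===== Notes on version B (the rewrite author's own statement) =====
-- stated objective: alternative
-- what changed: Replaces the comparison sort by key with a counting/bucket sort: triplets are dropped (in the same enumeration order, which reproduces the stable-sort tie order) into an array of buckets indexed by the sum of squares, and the buckets are concatenated in index order; sorted() on the triplets disappears entirely.
import Mathlib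
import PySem

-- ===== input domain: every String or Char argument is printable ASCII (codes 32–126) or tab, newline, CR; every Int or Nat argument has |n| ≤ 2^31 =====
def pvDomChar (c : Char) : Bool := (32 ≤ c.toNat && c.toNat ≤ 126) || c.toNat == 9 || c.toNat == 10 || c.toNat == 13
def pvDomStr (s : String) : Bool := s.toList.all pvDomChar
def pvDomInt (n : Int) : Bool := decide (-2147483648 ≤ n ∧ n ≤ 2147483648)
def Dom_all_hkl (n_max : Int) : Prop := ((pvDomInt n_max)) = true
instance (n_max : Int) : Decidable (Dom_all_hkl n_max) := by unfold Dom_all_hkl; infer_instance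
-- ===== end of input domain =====

-- B replaces A's comparison sort by key with a counting/bucket sort over the sum of squares
-- (buckets filled in enumeration order, concatenated in index order); same return value.


-- ===== PORT A =====
def all_hkl (n_max : Int) : List (List Int) :=
  PySem.List.sorted
    ((PySem.List.pyRange 1 n_max 1).foldl (fun acc l =>
      (PySem.List.pyRange 0 (l + 1) 1).foldl (fun acc k =>
        (PySem.List.pyRange 0 (k + 1) 1).foldl (fun acc h =>
          acc ++ [PySem.List.sorted [h, k, l] (fun x => x) true]) acc) acc) [])
    (fun x => (x.map (fun i => i ^ 2)).sum) false

-- ===== PORT B =====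
def all_hkl_alt (n_max : Int) : List (List Int) :=
  if n_max ≤ 1 then []
  else
    let size : Nat := (3 * (n_max - 1) ^ 2 + 1).toNat
    -- buckets[s].append(t) is ported as a functional set at index s (always in range here)
    let buckets : List (List (List Int)) :=
      (PySem.List.pyRange 1 n_max 1).foldl (fun bs l =>
        (PySem.List.pyRange 0 (l + 1) 1).foldl (fun bs k =>
          (PySem.List.pyRange 0 (k + 1) 1).foldl (fun bs h =>
            bs.set (l ^ 2 + k ^ 2 + h ^ 2).toNat
              (bs.getD (l ^ 2 + k ^ 2 + h ^ 2).toNat [] ++ [[l, k, h]])) bs) bs)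
        (List.replicate size [])
    buckets.foldl (fun out b => out ++ b) []

-- ===== PRECONDITION & SPEC =====
def Spec_all_hkl (n_max : Int) (out : List (List Int)) : Prop := out = all_hkl_alt n_max
instance (n_max : Int) (out : List (List Int)) : Decidable (Spec_all_hkl n_max out) := by unfold Spec_all_hkl; infer_instance

-- ===== CLAIM (what is proved, stated in full; the proofs are below) =====
def Claim_equal_all_hkl : Prop := ∀ (n_max : Int), Dom_all_hkl n_max → Spec_all_hkl n_max (all_hkl n_max)

-- ===== LEMMAS AND PROOFS =====

-- the sort key of A: sum of squares of the entries
def hklKey (x : List Int) : Int := (x.map (fun i => i ^ 2)).sum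

-- the triplets in enumeration order, as a flatMap
def hklEnum (n : Int) : List (List Int) :=
  (PySem.List.pyRange 1 n 1).flatMap (fun l =>
    (PySem.List.pyRange 0 (l + 1) 1).flatMap (fun k =>
      (PySem.List.pyRange 0 (k + 1) 1).map (fun h => [l, k, h])))

theorem sorted_triple (h k l : Int) (h1 : h ≤ k) (h2 : k ≤ l) :
    PySem.List.sorted [h, k, l] (fun x => x) true = [l, k, h] := by
  simp only [PySem.List.sorted, List.foldl, if_true]
  by_cases a : h < k <;> by_cases b : k < l <;> by_cases c : h < l <;>
    simp [PySem.List.insertBy.eq_def, a, b, c] <;> omega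

theorem inner_h (l k : Int) (hkl : k ≤ l) (acc : List (List Int)) :
    (PySem.List.pyRange 0 (k + 1) 1).foldl (fun acc h =>
        acc ++ [PySem.List.sorted [h, k, l] (fun x => x) true]) acc
      = acc ++ (PySem.List.pyRange 0 (k + 1) 1).map (fun h => [l, k, h]) := by
  rw [PySem.List.foldl_congr_mem _ _ (fun acc h => acc ++ [[l, k, h]]) _ ?_]
  · exact PySem.List.foldl_append_singleton_eq_map _ _ _
  · intro acc h hh
    rw [PySem.List.mem_pyRange_one] at hh
    rw [sorted_triple h k l (by omega) hkl]

theorem inner_k (l : Int) (acc : List (List Int)) :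
    (PySem.List.pyRange 0 (l + 1) 1).foldl (fun acc k =>
        (PySem.List.pyRange 0 (k + 1) 1).foldl (fun acc h =>
          acc ++ [PySem.List.sorted [h, k, l] (fun x => x) true]) acc) acc
      = acc ++ (PySem.List.pyRange 0 (l + 1) 1).flatMap (fun k =>
          (PySem.List.pyRange 0 (k + 1) 1).map (fun h => [l, k, h])) := by
  rw [PySem.List.foldl_congr_mem _ _
      (fun acc k => acc ++ (PySem.List.pyRange 0 (k + 1) 1).map (fun h => [l, k, h])) _ ?_]
  · exact PySem.List.foldl_append_eq_flatMap _ _ _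
  · intro acc k hk
    rw [PySem.List.mem_pyRange_one] at hk
    exact inner_h l k (by omega) acc

theorem A_eq (n : Int) : all_hkl n = PySem.List.sorted (hklEnum n) hklKey false := by
  unfold all_hkl hklKey hklEnum
  congr 1
  rw [PySem.List.foldl_congr_mem _ _
      (fun acc l => acc ++ (PySem.List.pyRange 0 (l + 1) 1).flatMap (fun k =>
        (PySem.List.pyRange 0 (k + 1) 1).map (fun h => [l, k, h]))) _ ?_]
  · rw [PySem.List.foldl_append_eq_flatMap]; simp
  · intro acc l _
    exact inner_k l acc

theorem key_triple (l k h : Int) : hklKey [l, k, h] = l ^ 2 + k ^ 2 + h ^ 2 := by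
  simp [hklKey]; ring

theorem B_fold_eq (n : Int) (b0 : List (List (List Int))) :
    (PySem.List.pyRange 1 n 1).foldl (fun bs l =>
      (PySem.List.pyRange 0 (l + 1) 1).foldl (fun bs k =>
        (PySem.List.pyRange 0 (k + 1) 1).foldl (fun bs h =>
          bs.set (l ^ 2 + k ^ 2 + h ^ 2).toNat
            (bs.getD (l ^ 2 + k ^ 2 + h ^ 2).toNat [] ++ [[l, k, h]])) bs) bs) b0
      = (hklEnum n).foldl (fun bs t =>
          bs.set (hklKey t).toNat (bs.getD (hklKey t).toNat [] ++ [t])) b0 := by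
  rw [hklEnum]
  simp only [List.foldl_flatMap, List.foldl_map]
  apply PySem.List.foldl_congr_mem
  intro bs l _
  apply PySem.List.foldl_congr_mem
  intro bs k _
  apply PySem.List.foldl_congr_mem
  intro bs h _
  rw [key_triple]

theorem getD_map_range {β : Type} (f : Nat → β) (n j : Nat) (d : β) (hj : j < n) :
    ((List.range n).map f).getD j d = f j := by
  rw [List.getD_eq_getElem?_getD]
  simp [hj]

theorem set_map_range {β : Type} (f : Nat → β) (n j : Nat) (v : β) :
    ((List.range n).map f).set j v
      = (List.range n).map (fun i => if i = j then v else f i) := by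
  apply List.ext_getElem
  · simp
  · intro i h1 h2
    simp only [List.getElem_set, List.getElem_map, List.getElem_range]
    by_cases hij : i = j
    · simp [hij]
    · simp [hij, Ne.symm hij]

theorem bucket_inv (key : List Int → Int) (size : Nat) (ts : List (List Int))
    (hmem : ∀ t ∈ ts, 0 ≤ key t ∧ key t < (size : Int)) :
    ts.foldl (fun bs t => bs.set (key t).toNat (bs.getD (key t).toNat [] ++ [t]))
        (List.replicate size ([] : List (List Int)))
      = (List.range size).map (fun (i : Nat) => ts.filter (fun t => decide (key t = (i : Int)))) := by
  induction ts using List.reverseRecOn with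
  | nil => simp [List.map_const']
  | append_singleton ts t ih =>
    rw [List.foldl_append]
    simp only [List.foldl]
    rw [ih (fun t' ht' => hmem t' (by simp [ht']))]
    obtain ⟨h0, h1⟩ := hmem t (by simp)
    rw [getD_map_range _ _ _ _ (by omega), set_map_range]
    apply List.map_congr_left
    intro i hi
    rw [List.filter_append]
    have hkt : max (key t) 0 = key t := by omega
    by_cases hit : (i : Int) = key t
    · rw [if_pos (by omega)]
      simp [hit, hkt]
    · rw [if_neg (by omega)]
      simp
      omega

theorem insertBy_prefix {α : Type} (before : α → α → Bool) (x : α) (B R : List α)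
    (hB : ∀ b ∈ B, before x b = false) :
    PySem.List.insertBy before x (B ++ R) = B ++ PySem.List.insertBy before x R := by
  induction B with
  | nil => simp
  | cons b B ih =>
    simp only [List.cons_append, PySem.List.insertBy]
    rw [hB b (by simp)]
    simp only [Bool.false_eq_true, if_false]
    rw [ih (fun b' hb' => hB b' (by simp [hb']))]

theorem insertBy_front {α : Type} (before : α → α → Bool) (x : α) (R : List α)
    (hR : ∀ r ∈ R, before x r = true) :
    PySem.List.insertBy before x R = x :: R := by
  cases R with
  | nil => rfl
  | cons r R => simp [PySem.List.insertBy, hR r (by simp)]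

theorem flatMap_if_not_mem {α : Type} (c : Int) (x : α) (ks : List Int)
    (F : Int → List α) (hc : c ∉ ks) :
    ks.flatMap (fun s => F s ++ if c = s then [x] else []) = ks.flatMap F := by
  induction ks with
  | nil => rfl
  | cons s ks ih =>
    simp only [List.flatMap_cons]
    rw [if_neg (by rintro rfl; exact hc (by simp)), ih (fun h => hc (by simp [h]))]
    simp

theorem insertBy_buckets {α : Type} (key : α → Int) (x : α) (F : Int → List α)
    (ks : List Int) (hks : ks.Pairwise (· < ·))
    (hF : ∀ s ∈ ks, ∀ y ∈ F s, key y = s) (hx : key x ∈ ks) :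
    PySem.List.insertBy (fun a b => decide (key a < key b)) x (ks.flatMap F)
      = ks.flatMap (fun s => F s ++ if key x = s then [x] else []) := by
  induction ks with
  | nil => simp at hx
  | cons s ks ih =>
    rw [List.pairwise_cons] at hks
    simp only [List.flatMap_cons]
    by_cases hxe : key x = s
    · rw [insertBy_prefix _ _ _ _ (by
        intro b hb
        rw [hF s (by simp) b hb, hxe]
        simp)]
      rw [insertBy_front _ _ _ (by
        intro r hr
        rw [List.mem_flatMap] at hr
        obtain ⟨s', hs', hrs'⟩ := hr
        rw [hF s' (by simp [hs']) r hrs', hxe]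
        simp only [decide_eq_true_eq]
        exact hks.1 s' hs')]
      rw [if_pos hxe]
      rw [flatMap_if_not_mem (key x) x ks F (by
        intro hmem
        exact absurd (hks.1 _ hmem) (by omega))]
      simp
    · have hxks : key x ∈ ks := by
        rcases List.mem_cons.mp hx with hc | hc
        · exact absurd hc hxe
        · exact hc
      rw [insertBy_prefix _ _ _ _ (by
        intro b hb
        rw [hF s (by simp) b hb]
        have := hks.1 _ hxks
        simp only [decide_eq_false_iff_not]
        omega)]
      rw [ih hks.2 (fun s' hs' => hF s' (by simp [hs'])) hxks, if_neg hxe]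
      simp

theorem sorted_flatMap {α : Type} (key : α → Int) (ks : List Int)
    (hks : ks.Pairwise (· < ·)) (xs : List α) (hxs : ∀ x ∈ xs, key x ∈ ks) :
    PySem.List.sorted xs key false
      = ks.flatMap (fun s => xs.filter (fun x => decide (key x = s))) := by
  induction xs using List.reverseRecOn with
  | nil => simp [PySem.List.sorted]
  | append_singleton ts x ih =>
    rw [PySem.List.sorted_eq_foldl_insertBy, List.foldl_append]
    simp only [List.foldl]
    rw [← PySem.List.sorted_eq_foldl_insertBy,
      ih (fun t ht => hxs t (by simp [ht]))]
    rw [insertBy_buckets key x _ ks hks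
      (by intro s _ y hy; simpa using (List.mem_filter.mp hy).2) (hxs x (by simp))]
    simp [List.filter_append, List.filter_cons]

-- helper: foldl append is flatten
theorem foldl_append_flatten {α : Type} (bs : List (List α)) (acc : List α) :
    bs.foldl (fun out b => out ++ b) acc = acc ++ bs.flatten := by
  induction bs generalizing acc with
  | nil => simp
  | cons b bs ih => simp [List.foldl, ih]

-- ===== VERDICT (by name: the statement is the Claim_ definition above) =====
theorem all_hkl_spec : Claim_equal_all_hkl := by
  intro n _
  unfold Spec_all_hkl
  by_cases hn : n ≤ 1
  · have hnil : PySem.List.pyRange 1 n 1 = [] := by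
      apply List.eq_nil_iff_forall_not_mem.mpr
      intro x hx; rw [PySem.List.mem_pyRange_one] at hx; omega
    have h1 : hklEnum n = [] := by simp [hklEnum, hnil]
    rw [A_eq, h1]
    simp [all_hkl_alt, if_pos hn, PySem.List.sorted]
  · have hn' : ¬ n ≤ 1 := hn
    push Not at hn
    have hsz : ((3 * (n - 1) ^ 2 + 1).toNat : Int) = 3 * (n - 1) ^ 2 + 1 := by
      rw [Int.toNat_of_nonneg]; nlinarith [sq_nonneg (n - 1)]
    set size : Nat := (3 * (n - 1) ^ 2 + 1).toNat with hsize
    have hbound : ∀ x ∈ hklEnum n, 0 ≤ hklKey x ∧ hklKey x < (size : Int) := by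
      intro x hx
      simp only [hklEnum, List.mem_flatMap, List.mem_map, PySem.List.mem_pyRange_one] at hx
      obtain ⟨l, hl, k, hk, h, hh, rfl⟩ := hx
      rw [key_triple, hsize, hsz]
      constructor
      · positivity
      · nlinarith [mul_nonneg (by omega : (0:ℤ) ≤ n - 1 - l) (by omega : (0:ℤ) ≤ n - 1 + l),
          mul_nonneg (by omega : (0:ℤ) ≤ n - 1 - k) (by omega : (0:ℤ) ≤ n - 1 + k),
          mul_nonneg (by omega : (0:ℤ) ≤ n - 1 - h) (by omega : (0:ℤ) ≤ n - 1 + h)]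
    rw [A_eq, sorted_flatMap hklKey ((List.range size).map (fun (i : Nat) => (i : Int)))
        (by
          rw [List.pairwise_map]
          exact (List.pairwise_lt_range).imp (by intro a b hab; exact_mod_cast hab))
        (hklEnum n)
        (by
          intro x hx
          obtain ⟨h0, h1⟩ := hbound x hx
          simp only [List.mem_map, List.mem_range]
          
          exact ⟨(hklKey x).toNat, by omega, by omega⟩)]
    simp only [all_hkl_alt, if_neg hn']
    rw [← hsize, B_fold_eq, bucket_inv hklKey size (hklEnum n) hbound, foldl_append_flatten,
      List.nil_append, ← List.flatMap_def, List.flatMap_map]
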